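-- pv_equiv track=rewrite | github.com/sfilges/umierrorcorrect2 | umierrorcorrect2/umi_error_correct.py | split_into_chunks
-- ===== SOURCE A (Python) =====
-- def split_into_chunks(umi_dict: dict[str, int], clusters: list[list[str]]) -> list[dict[str, int]]:
--     """Split a region into chunks if it contains more than 100000 raw reads.
--
--     Keeps all barcodes in the same cluster together in the same chunk.
--     """
--     n = 0
--     newdicts = []
--     newdict = {}
--     for c in clusters:
--         for j in c:
--             count = umi_dict[j]
--             newdict[j] = count
--             n += count
--         if n > 100000:
--             newdicts.append(newdict)
--             newdict = {}
--             n = 0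
--     newdicts.append(newdict)  # add remaining entries
--     return newdicts
-- ===== SOURCE B (Python) =====
-- def _find_split(umi_dict, clusters):
--     """Return (prefix, rest) where prefix is the shortest leading run of
--     clusters whose total read count exceeds 100000, or None if no prefix does."""
--     n = 0
--     for i, c in enumerate(clusters):
--         n += sum(umi_dict[j] for j in c)
--         if n > 100000:
--             return clusters[:i + 1], clusters[i + 1:]
--     return None
--
--
-- def _chunk_dict(umi_dict, chunk):
--     return {j: umi_dict[j] for c in chunk for j in c}
--
--
-- def split_into_chunks(umi_dict, clusters):
--     chunks = []
--     rest = clusters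
--     while True:
--         split = _find_split(umi_dict, rest)
--         if split is None:
--             chunks.append(_chunk_dict(umi_dict, rest))
--             return chunks
--         prefix, rest = split
--         chunks.append(_chunk_dict(umi_dict, prefix))
-- ===== Notes on version B (the rewrite author's own statement) =====
-- stated objective: alternative
-- what changed: Instead of one fused loop carrying a running count, a growing dict and a flush, B repeatedly finds the shortest leading run of clusters whose read total crosses the threshold, emits that run's merged dict, and recurses on the remainder; the trailing (possibly empty) chunk falls out of the no-split case.
import Mathlib
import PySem

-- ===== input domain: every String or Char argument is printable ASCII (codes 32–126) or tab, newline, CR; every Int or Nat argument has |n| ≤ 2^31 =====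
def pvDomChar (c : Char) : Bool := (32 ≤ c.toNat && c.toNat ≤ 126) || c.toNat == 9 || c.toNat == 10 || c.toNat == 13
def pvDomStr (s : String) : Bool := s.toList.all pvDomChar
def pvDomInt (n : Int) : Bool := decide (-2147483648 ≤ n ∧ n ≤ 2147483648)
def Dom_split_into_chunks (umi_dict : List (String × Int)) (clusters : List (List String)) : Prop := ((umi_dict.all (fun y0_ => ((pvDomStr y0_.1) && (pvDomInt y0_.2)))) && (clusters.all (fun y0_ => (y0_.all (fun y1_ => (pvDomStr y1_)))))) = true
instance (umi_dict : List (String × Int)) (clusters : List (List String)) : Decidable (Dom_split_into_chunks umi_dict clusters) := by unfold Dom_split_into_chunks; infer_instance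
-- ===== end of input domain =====

-- B replaces A's fused running-count/flush loop by "repeatedly split off the shortest
-- threshold-crossing prefix of clusters, emit its merged dict, recurse" (objective: alternative).

-- ===== PORT A =====
-- umi_dict[j] (KeyError excluded by Pre_) ported as Dict lookup with default 0
def pvLook (umi_dict : List (String × Int)) (j : String) : Int :=
  (PySem.Dict.mk umi_dict).getD j 0

-- one iteration of A's outer loop: state = (n, newdicts, newdict)
def pvAStep (umi_dict : List (String × Int))
    (st : Int × List (List (String × Int)) × PySem.Dict String Int)
    (c : List String) : Int × List (List (String × Int)) × PySem.Dict String Int :=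
  let i := c.foldl
    (fun (p : Int × PySem.Dict String Int) j =>
      let count := pvLook umi_dict j
      (p.1 + count, p.2.insert j count))
    (st.1, st.2.2)
  if i.1 > 100000 then (0, st.2.1 ++ [i.2.items], PySem.Dict.empty)
  else (i.1, st.2.1, i.2)

def split_into_chunks (umi_dict : List (String × Int)) (clusters : List (List String)) : List (List (String × Int)) :=
  let st := clusters.foldl (pvAStep umi_dict) (0, [], PySem.Dict.empty)
  st.2.1 ++ [st.2.2.items]

-- ===== PORT B =====
-- sum(umi_dict[j] for j in c)
def pvClusterTotal (umi_dict : List (String × Int)) (c : List String) : Int :=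
  c.foldl (fun s j => s + pvLook umi_dict j) 0

-- insert one cluster's barcodes into a dict
def pvClusterIns (umi_dict : List (String × Int)) (d : PySem.Dict String Int)
    (c : List String) : PySem.Dict String Int :=
  c.foldl (fun d j => d.insert j (pvLook umi_dict j)) d

-- _chunk_dict
def pvChunkDict (umi_dict : List (String × Int)) (chunk : List (List String)) : PySem.Dict String Int :=
  chunk.foldl (pvClusterIns umi_dict) PySem.Dict.empty

-- _find_split: shortest threshold-crossing prefix and the remainder, or none
def pvFindSplit (umi_dict : List (String × Int)) (n : Int) :
    List (List String) → Option (List (List String) × List (List String))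
  | [] => none
  | c :: rest =>
    let n' := n + pvClusterTotal umi_dict c
    if n' > 100000 then some ([c], rest)
    else (pvFindSplit umi_dict n' rest).map (fun pq => (c :: pq.1, pq.2))

-- termination lemma for the B port (cited by its decreasing_by)
theorem pvFindSplit_snd_lt (umi_dict : List (String × Int)) :
    ∀ (cs : List (List String)) (n : Int) (pq : List (List String) × List (List String)),
    pvFindSplit umi_dict n cs = some pq → pq.2.length < cs.length := by
  intro cs
  induction cs with
  | nil => intro n pq h; simp [pvFindSplit] at h
  | cons c rest ih =>
    intro n pq h
    simp only [pvFindSplit] at h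
    split at h
    · cases h; simp
    · rcases Option.map_eq_some_iff.mp h with ⟨pq', h', rfl⟩
      have := ih _ _ h'
      simpa using Nat.lt_succ_of_lt this

def split_into_chunks_alt (umi_dict : List (String × Int)) (clusters : List (List String)) : List (List (String × Int)) :=
  match h : pvFindSplit umi_dict 0 clusters with
  | none => [(pvChunkDict umi_dict clusters).items]
  | some pq => (pvChunkDict umi_dict pq.1).items :: split_into_chunks_alt umi_dict pq.2
termination_by clusters.length
decreasing_by exact pvFindSplit_snd_lt umi_dict clusters 0 pq h

-- ===== PRECONDITION & SPEC =====
-- Pre_ excludes exactly the inputs where Python A raises KeyError: a barcode in clusters missing from umi_dict.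
def Pre_split_into_chunks (umi_dict : List (String × Int)) (clusters : List (List String)) : Prop :=
  ∀ c ∈ clusters, ∀ j ∈ c, j ∈ umi_dict.map Prod.fst
instance (umi_dict : List (String × Int)) (clusters : List (List String)) : Decidable (Pre_split_into_chunks umi_dict clusters) := by unfold Pre_split_into_chunks; infer_instance
def pvWitness_split_into_chunks : (List (String × Int)) × List (List String) :=
  ([("AAA", 3), ("CCC", 100001)], [["AAA"], ["CCC", "AAA"], []])

def Spec_split_into_chunks (umi_dict : List (String × Int)) (clusters : List (List String)) (out : List (List (String × Int))) : Prop := out = split_into_chunks_alt umi_dict clusters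
instance (umi_dict : List (String × Int)) (clusters : List (List String)) (out : List (List (String × Int))) : Decidable (Spec_split_into_chunks umi_dict clusters out) := by unfold Spec_split_into_chunks; infer_instance

-- ===== CLAIM (what is proved, stated in full; the proofs are below) =====
def Claim_equal_split_into_chunks : Prop := ∀ (umi_dict : List (String × Int)) (clusters : List (List String)), Dom_split_into_chunks umi_dict clusters → Pre_split_into_chunks umi_dict clusters → Spec_split_into_chunks umi_dict clusters (split_into_chunks umi_dict clusters)

-- ===== LEMMAS AND PROOFS =====

-- unfolding equation for the B port (its match names the scrutinee, so rw needs this form)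
theorem pvAlt_eq (umi_dict : List (String × Int)) (cs : List (List String)) :
    split_into_chunks_alt umi_dict cs
      = (match pvFindSplit umi_dict 0 cs with
         | none => [(pvChunkDict umi_dict cs).items]
         | some pq => (pvChunkDict umi_dict pq.1).items :: split_into_chunks_alt umi_dict pq.2) := by
  rw [split_into_chunks_alt]
  split
  · next heq => rw [heq]
  · next pq heq => rw [heq]

-- A's inner fold over one cluster computes (n + cluster total, insertions of the cluster)
theorem pvInner_eq (umi_dict : List (String × Int)) :
    ∀ (c : List String) (n : Int) (d : PySem.Dict String Int),
    c.foldl (fun (p : Int × PySem.Dict String Int) j =>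
        (p.1 + pvLook umi_dict j, p.2.insert j (pvLook umi_dict j))) (n, d)
      = (n + pvClusterTotal umi_dict c, pvClusterIns umi_dict d c) := by
  intro c
  induction c with
  | nil => intro n d; simp [pvClusterTotal, pvClusterIns]
  | cons j c ih =>
    intro n d
    simp only [List.foldl_cons, ih]
    have ht : pvClusterTotal umi_dict (j :: c)
        = pvLook umi_dict j + pvClusterTotal umi_dict c := by
      simp only [pvClusterTotal, List.foldl_cons, zero_add, PySem.List.foldl_add]
    rw [ht, ← add_assoc]
    simp [pvClusterIns]

-- the accumulator of A's outer fold factors out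
theorem pvAcc_factor (umi_dict : List (String × Int)) :
    ∀ (cs : List (List String)) (n : Int) (acc : List (List (String × Int)))
      (d : PySem.Dict String Int),
    cs.foldl (pvAStep umi_dict) (n, acc, d)
      = ((cs.foldl (pvAStep umi_dict) (n, [], d)).1,
         acc ++ (cs.foldl (pvAStep umi_dict) (n, [], d)).2.1,
         (cs.foldl (pvAStep umi_dict) (n, [], d)).2.2) := by
  intro cs
  induction cs with
  | nil => intro n acc d; simp
  | cons c cs ih =>
    intro n acc d
    simp only [List.foldl_cons]
    by_cases h : (n + pvClusterTotal umi_dict c) > 100000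
    · have hs : ∀ a, pvAStep umi_dict (n, a, d) c
          = (0, a ++ [(pvClusterIns umi_dict d c).items], PySem.Dict.empty) := by
        intro a
        simp only [pvAStep, pvInner_eq]
        simp [h]
      rw [hs acc, hs [], ih _ (acc ++ _) _, ih _ ([] ++ _) _]
      simp
    · have hs : ∀ a, pvAStep umi_dict (n, a, d) c
          = (n + pvClusterTotal umi_dict c, a, pvClusterIns umi_dict d c) := by
        intro a
        simp only [pvAStep, pvInner_eq]
        simp [h]
      rw [hs acc, hs [], ih _ acc _]

-- A's result from a mid-chunk state (n, [], d) equals B's chunking with carry-in n and d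
theorem pvMain (umi_dict : List (String × Int)) :
    ∀ (cs : List (List String)) (n : Int) (d : PySem.Dict String Int),
    (let st := cs.foldl (pvAStep umi_dict) (n, [], d); st.2.1 ++ [st.2.2.items])
      = (match pvFindSplit umi_dict n cs with
         | none => [(cs.foldl (pvClusterIns umi_dict) d).items]
         | some pq => ((pq.1.foldl (pvClusterIns umi_dict) d).items)
                        :: split_into_chunks_alt umi_dict pq.2) := by
  intro cs
  induction cs with
  | nil => intro n d; simp [pvFindSplit]
  | cons c cs ih =>
    intro n d
    simp only [List.foldl_cons, pvFindSplit]
    by_cases h : (n + pvClusterTotal umi_dict c) > 100000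
    · have hs : pvAStep umi_dict (n, [], d) c
          = (0, [(pvClusterIns umi_dict d c).items], PySem.Dict.empty) := by
        simp only [pvAStep, pvInner_eq]
        simp [h]
      rw [hs, pvAcc_factor umi_dict cs 0 _ _]
      simp only [h, if_pos]
      have := ih 0 PySem.Dict.empty
      simp only at this
      rw [List.append_assoc, List.singleton_append, this]
      cases hf : pvFindSplit umi_dict 0 cs with
      | none => rw [pvAlt_eq]; simp [hf, pvChunkDict]
      | some pq => rw [pvAlt_eq]; simp [hf, pvChunkDict]
    · have hs : pvAStep umi_dict (n, [], d) c
          = (n + pvClusterTotal umi_dict c, [], pvClusterIns umi_dict d c) := by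
        simp only [pvAStep, pvInner_eq]
        simp [h]
      rw [hs, ih _ _, if_neg h]
      cases pvFindSplit umi_dict (n + pvClusterTotal umi_dict c) cs with
      | none => simp
      | some pq => simp

-- ===== VERDICT (by name: the statement is the Claim_ definition above) =====
theorem split_into_chunks_spec : Claim_equal_split_into_chunks := by
  intro umi_dict clusters _ _
  unfold Spec_split_into_chunks split_into_chunks
  have := pvMain umi_dict clusters 0 PySem.Dict.empty
  simp only at this
  rw [this, pvAlt_eq]
  cases pvFindSplit umi_dict 0 clusters with
  | none => simp [pvChunkDict]
  | some pq => simp [pvChunkDict]
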